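-- pv_equiv track=rewrite | github.com/lgramu97/tensorflow_machine_learning | NaturalLanguageProcessing.py | integer_encoding
-- ===== SOURCE A (Python) =====
-- def integer_encoding(text,word_encoding=1):
--     '''
--         This involves representing each word or character in a sentence as a unique integer
--         and maintaining the order of these words.
--         This should hopefully fix the problem we saw before were we lost the order of words.
--     '''
--     vocab = {}  # maps word to integer representing it
--     words = text.lower().split(" ")
--     encoding = []
--
--     for word in words:
--         if word in vocab:
--             code = vocab[word]
--             encoding.append(code)
--         else:
--             vocab[word] = word_encoding
--             encoding.append(word_encoding)
--         word_encoding += 1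
--
--     return encoding, vocab
-- ===== SOURCE B (Python) =====
-- def integer_encoding(text, word_encoding=1):
--     '''Two-pass re-implementation: the code of each position is word_encoding + index,
--     so build the first-occurrence table with setdefault over enumerate, then look up.'''
--     vocab = {}
--     words = text.lower().split(" ")
--     for i, word in enumerate(words):
--         vocab.setdefault(word, word_encoding + i)
--     encoding = [vocab[word] for word in words]
--     return encoding, vocab
-- ===== Notes on version B (the rewrite author's own statement) =====
-- stated objective: simpler
-- what changed: Replaces the single loop with a running counter and an if/else hit-or-miss branch by two passes: a setdefault over enumerate builds the first-occurrence table (code = word_encoding + index), then the encoding is a pure lookup comprehension.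
import Mathlib
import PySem

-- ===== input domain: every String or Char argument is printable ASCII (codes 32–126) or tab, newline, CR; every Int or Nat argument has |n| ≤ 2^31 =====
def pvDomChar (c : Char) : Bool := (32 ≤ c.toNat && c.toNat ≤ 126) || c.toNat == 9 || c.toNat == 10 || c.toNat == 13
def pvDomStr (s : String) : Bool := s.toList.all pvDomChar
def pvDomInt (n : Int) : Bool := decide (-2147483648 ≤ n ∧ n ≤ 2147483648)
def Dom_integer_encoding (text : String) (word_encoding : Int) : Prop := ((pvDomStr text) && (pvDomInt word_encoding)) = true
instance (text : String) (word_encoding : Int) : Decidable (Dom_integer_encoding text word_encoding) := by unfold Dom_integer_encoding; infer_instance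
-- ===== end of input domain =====

-- B replaces A's running-counter loop with an if/else branch by a setdefault-over-enumerate
-- first pass plus a pure lookup pass (objective: simpler decomposition).


-- ===== PORT A =====
-- one iteration of A's loop: state = (vocab, encoding, word_encoding counter)
def aStep (st : PySem.Dict String Int × List Int × Int) (word : String) :
    PySem.Dict String Int × List Int × Int :=
  match st.1.get? word with
  | some code => (st.1, st.2.1 ++ [code], st.2.2 + 1)
  | none => (st.1.insert word st.2.2, st.2.1 ++ [st.2.2], st.2.2 + 1)

def integer_encoding (text : String) (word_encoding : Int) : List Int × (List (String × Int)) :=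
  let words := (PySem.Str.split? (PySem.Str.lower text) " ").getD []   -- sep " " ≠ "", split? is exact
  let st := words.foldl aStep (PySem.Dict.empty, [], word_encoding)
  (st.2.1, st.1.items)

-- ===== PORT B =====
def integer_encoding_alt (text : String) (word_encoding : Int) : List Int × (List (String × Int)) :=
  let words := (PySem.Str.split? (PySem.Str.lower text) " ").getD []
  let vocab := (PySem.List.enumerate words).foldl
      (fun d p => d.setdefault p.2 (word_encoding + p.1)) PySem.Dict.empty
  -- vocab[word]: every word is a key of vocab, so the default 0 is never used
  (words.map (fun w => vocab.getD w 0), vocab.items)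

-- ===== PRECONDITION & SPEC =====
def Spec_integer_encoding (text : String) (word_encoding : Int) (out : List Int × (List (String × Int))) : Prop := out = integer_encoding_alt text word_encoding
instance (text : String) (word_encoding : Int) (out : List Int × (List (String × Int))) : Decidable (Spec_integer_encoding text word_encoding out) := by unfold Spec_integer_encoding; infer_instance

-- ===== CLAIM (what is proved, stated in full; the proofs are below) =====
def Claim_equal_integer_encoding : Prop := ∀ (text : String) (word_encoding : Int), Dom_integer_encoding text word_encoding → Spec_integer_encoding text word_encoding (integer_encoding text word_encoding)

-- ===== LEMMAS AND PROOFS =====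

-- proof-side: B's vocab fold, with the code carried directly in the enumerate index
def gStep (d : PySem.Dict String Int) (p : Int × String) : PySem.Dict String Int :=
  d.setdefault p.2 p.1

lemma contains_gStep (d : PySem.Dict String Int) (p : Int × String) (w : String)
    (h : d.contains w = true) : (gStep d p).contains w = true := by
  simp only [gStep, PySem.Dict.setdefault]
  split
  · exact h
  · rcases p with ⟨v, k⟩
    rename_i hk
    have : (PySem.Dict.insert d k v).contains w = true := by
      rw [PySem.Dict.contains_insert]; simp [h]
    rwa [PySem.Dict.insert, if_neg (by simp [hk])] at this

lemma get?_gStep (d : PySem.Dict String Int) (p : Int × String) (w : String)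
    (h : d.contains w = true) : (gStep d p).get? w = d.get? w := by
  simp only [gStep, PySem.Dict.setdefault]
  split
  · rfl
  · rename_i hk
    rcases p with ⟨v, k⟩
    rcases eq_or_ne w k with rfl | hne
    · simp [h] at hk
    · have := PySem.Dict.get?_insert_of_ne d (k' := w) (k := k) v hne
      rwa [PySem.Dict.insert, if_neg (by simp [hk])] at this

lemma get?_foldl_gStep (l : List (Int × String)) (d : PySem.Dict String Int) (w : String)
    (h : d.contains w = true) : (l.foldl gStep d).get? w = d.get? w := by
  induction l generalizing d with
  | nil => rfl
  | cons p l ih =>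
      simp only [List.foldl_cons]
      rw [ih _ (contains_gStep d p w h), get?_gStep d p w h]

-- B's actual fold (value word_encoding + index, enumerate from s) is gStep over enumerate from we + s
lemma bFold_eq_gFold (we : Int) (ws : List String) :
    ∀ (s : Int) (d : PySem.Dict String Int),
      (PySem.List.enumerate ws s).foldl (fun d p => d.setdefault p.2 (we + p.1)) d
        = (PySem.List.enumerate ws (we + s)).foldl gStep d := by
  induction ws with
  | nil => intro s d; rfl
  | cons w ws ih =>
      intro s d
      rw [PySem.List.enumerate_cons, PySem.List.enumerate_cons]
      simp only [List.foldl_cons]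
      rw [ih (s + 1)]
      have : we + (s + 1) = we + s + 1 := by ring
      rw [this]
      rfl

-- the loop invariant: A's fold from (d, enc, c) is B's vocab fold (enumerate from c) plus lookups
lemma loop_eq (ws : List String) :
    ∀ (d : PySem.Dict String Int) (enc : List Int) (c : Int),
      ws.foldl aStep (d, enc, c)
        = ((PySem.List.enumerate ws c).foldl gStep d,
           enc ++ ws.map (fun w => ((PySem.List.enumerate ws c).foldl gStep d).getD w 0),
           c + ws.length) := by
  induction ws with
  | nil => intro d enc c; simp
  | cons w ws ih =>
      intro d enc c
      rw [PySem.List.enumerate_cons]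
      simp only [List.foldl_cons, List.map_cons]
      rcases hg : d.get? w with _ | code
      · -- miss: A inserts, B's setdefault inserts
        have hc : d.contains w = false := by
          rw [PySem.Dict.contains_eq_isSome_get?, hg]; rfl
        have hstep : aStep (d, enc, c) w = (d.insert w c, enc ++ [c], c + 1) := by
          simp [aStep, hg]
        have hgs : gStep d (c, w) = d.insert w c := by
          simp only [gStep, PySem.Dict.setdefault, PySem.Dict.insert, hc]
          rfl
        rw [hstep, ih, hgs]
        have hcw : (d.insert w c).contains w = true := PySem.Dict.contains_insert_self d w c
        have hget : ((PySem.List.enumerate ws (c + 1)).foldl gStep (d.insert w c)).getD w 0 = c := by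
          rw [PySem.Dict.getD_eq_get?_getD, get?_foldl_gStep _ _ _ hcw,
            PySem.Dict.get?_insert_self]; rfl
        rw [hget]
        simp only [Prod.mk.injEq, List.length_cons]
        refine ⟨by simp, by simp, by push_cast; ring⟩
      · -- hit: A appends the stored code, B's setdefault is a no-op
        have hc : d.contains w = true := by
          rw [PySem.Dict.contains_eq_isSome_get?, hg]; rfl
        have hstep : aStep (d, enc, c) w = (d, enc ++ [code], c + 1) := by
          simp [aStep, hg]
        have hgs : gStep d (c, w) = d := by
          simp [gStep, PySem.Dict.setdefault, hc]
        rw [hstep, ih, hgs]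
        have hget : ((PySem.List.enumerate ws (c + 1)).foldl gStep d).getD w 0 = code := by
          rw [PySem.Dict.getD_eq_get?_getD, get?_foldl_gStep _ _ _ hc, hg]; rfl
        rw [hget]
        simp only [Prod.mk.injEq, List.length_cons]
        refine ⟨by simp, by simp, by push_cast; ring⟩

-- ===== VERDICT (by name: the statement is the Claim_ definition above) =====
theorem integer_encoding_spec : Claim_equal_integer_encoding := by
  intro text we _
  show _ = _
  simp only [integer_encoding, integer_encoding_alt]
  rw [bFold_eq_gFold we _ 0 PySem.Dict.empty]
  rw [loop_eq _ PySem.Dict.empty [] we]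
  simp
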